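-- pv_equiv track=rewrite | github.com/jeduardo44/projects_ai | Desktop/project_summer/future_implementations/real_ml_models.py | extract_features_from_inputs
-- ===== SOURCE A (Python) =====
-- from typing import Dict, List, Tuple, Any
--
-- def extract_features_from_inputs(file_data: Any, images_data: Any, video_data: Any, symptoms_text: str) -> Dict[str, Any]:
--     """
--     Extract features from various input types for ML prediction
--     This is a simplified version - in reality, this would be much more sophisticated
--
--     Args:
--         file_data: Uploaded file data
--         images_data: Uploaded medical images
--         video_data: Uploaded medical videos
--         symptoms_text: Patient symptoms text
--
--     Returns:
--         Dictionary with extracted features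
--     """
--     features = {}
--
--     # Extract features from symptoms text (basic keyword matching)
--     if symptoms_text:
--         symptoms_lower = symptoms_text.lower()
--
--         # Age estimation (very basic)
--         if 'elderly' in symptoms_lower or 'senior' in symptoms_lower:
--             features['age'] = 70
--         elif 'young' in symptoms_lower or 'teenager' in symptoms_lower:
--             features['age'] = 25
--         else:
--             features['age'] = 45  # Default middle age
--
--         # BMI estimation from keywords
--         if 'overweight' in symptoms_lower or 'obese' in symptoms_lower:
--             features['bmi'] = 30
--         elif 'underweight' in symptoms_lower or 'thin' in symptoms_lower:
--             features['bmi'] = 20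
--         else:
--             features['bmi'] = 25
--
--         # Glucose-related symptoms
--         if any(keyword in symptoms_lower for keyword in ['thirsty', 'urination', 'fatigue', 'blurred vision']):
--             features['glucose_level'] = 150  # Elevated
--         else:
--             features['glucose_level'] = 100  # Normal
--
--         # Blood pressure estimation
--         if 'high blood pressure' in symptoms_lower or 'hypertension' in symptoms_lower:
--             features['blood_pressure'] = 140
--         else:
--             features['blood_pressure'] = 120
--
--         # Other defaults
--         features['insulin_level'] = 15
--         features['family_history'] = 1 if 'family history' in symptoms_lower else 0
--         features['physical_activity'] = 2 if 'sedentary' in symptoms_lower else 3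
--         features['diet_score'] = 2 if 'poor diet' in symptoms_lower else 3
--         features['stress_level'] = 4 if 'stressed' in symptoms_lower else 3
--
--     else:
--         # Default values if no symptoms provided
--         features = {
--             'age': 45,
--             'bmi': 25,
--             'glucose_level': 100,
--             'blood_pressure': 120,
--             'insulin_level': 15,
--             'family_history': 0,
--             'physical_activity': 3,
--             'diet_score': 3,
--             'stress_level': 3
--         }
--
--     # In a real implementation, we would also extract features from:
--     # - File data (structured medical records, lab results)
--     # - Images (using computer vision models)
--     # - Video data (temporal analysis)
--
--     return features
-- ===== SOURCE B (Python) =====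
-- # Table-driven rewrite: ordered rules table (feature, tiers, default) drives one loop.
-- RULES = [
--     ("age", [(("elderly", "senior"), 70), (("young", "teenager"), 25)], 45),
--     ("bmi", [(("overweight", "obese"), 30), (("underweight", "thin"), 20)], 25),
--     ("glucose_level", [(("thirsty", "urination", "fatigue", "blurred vision"), 150)], 100),
--     ("blood_pressure", [(("high blood pressure", "hypertension"), 140)], 120),
--     ("insulin_level", [], 15),
--     ("family_history", [(("family history",), 1)], 0),
--     ("physical_activity", [(("sedentary",), 2)], 3),
--     ("diet_score", [(("poor diet",), 2)], 3),
--     ("stress_level", [(("stressed",), 4)], 3),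
-- ]
--
-- def extract_features_from_inputs(file_data, images_data, video_data, symptoms_text):
--     low = symptoms_text.lower()
--     features = {}
--     for name, tiers, default in RULES:
--         value = default
--         for keywords, v in tiers:
--             if any(k in low for k in keywords):
--                 value = v
--                 break
--         features[name] = value
--     return features
-- ===== Notes on version B (the rewrite author's own statement) =====
-- stated objective: simpler
-- what changed: Replaces the hand-written if/elif chains with a data-driven ordered rules table (feature, keyword-tiers, default) consumed by one generic first-match loop, and drops the special empty-text branch since the table's defaults reproduce it.
import Mathlib
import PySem

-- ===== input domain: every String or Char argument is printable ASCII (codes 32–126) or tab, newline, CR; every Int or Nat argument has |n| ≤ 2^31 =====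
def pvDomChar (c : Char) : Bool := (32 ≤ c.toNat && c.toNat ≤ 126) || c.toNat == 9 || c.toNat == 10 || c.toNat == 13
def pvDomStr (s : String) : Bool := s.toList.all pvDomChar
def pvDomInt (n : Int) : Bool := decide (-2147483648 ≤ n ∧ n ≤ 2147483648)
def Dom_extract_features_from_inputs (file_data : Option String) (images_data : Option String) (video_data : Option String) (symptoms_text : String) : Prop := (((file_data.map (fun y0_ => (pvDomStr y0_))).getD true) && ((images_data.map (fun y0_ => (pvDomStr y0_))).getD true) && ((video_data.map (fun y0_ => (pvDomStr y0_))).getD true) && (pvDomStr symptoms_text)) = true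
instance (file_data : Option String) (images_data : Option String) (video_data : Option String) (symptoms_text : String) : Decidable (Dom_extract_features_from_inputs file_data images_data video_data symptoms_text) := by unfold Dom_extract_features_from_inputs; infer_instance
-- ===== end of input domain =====

-- B replaces A's if/elif chains by a data-driven rules table with one generic first-match loop (objective: simpler).

-- ===== PORT A =====
def extract_features_from_inputs (file_data : Option String) (images_data : Option String) (video_data : Option String) (symptoms_text : String) : List (String × Int) :=
  if symptoms_text ≠ "" then
    let sl := PySem.Str.lower symptoms_text
    let features : PySem.Dict String Int := PySem.Dict.empty
    let features := features.insert "age"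
      (if PySem.Str.isIn "elderly" sl || PySem.Str.isIn "senior" sl then 70
       else if PySem.Str.isIn "young" sl || PySem.Str.isIn "teenager" sl then 25
       else 45)
    let features := features.insert "bmi"
      (if PySem.Str.isIn "overweight" sl || PySem.Str.isIn "obese" sl then 30
       else if PySem.Str.isIn "underweight" sl || PySem.Str.isIn "thin" sl then 20
       else 25)
    let features := features.insert "glucose_level"
      (if (["thirsty", "urination", "fatigue", "blurred vision"] : List String).any
            (fun keyword => PySem.Str.isIn keyword sl) then 150 else 100)
    let features := features.insert "blood_pressure"
      (if PySem.Str.isIn "high blood pressure" sl || PySem.Str.isIn "hypertension" sl then 140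
       else 120)
    let features := features.insert "insulin_level" 15
    let features := features.insert "family_history"
      (if PySem.Str.isIn "family history" sl then 1 else 0)
    let features := features.insert "physical_activity"
      (if PySem.Str.isIn "sedentary" sl then 2 else 3)
    let features := features.insert "diet_score"
      (if PySem.Str.isIn "poor diet" sl then 2 else 3)
    let features := features.insert "stress_level"
      (if PySem.Str.isIn "stressed" sl then 4 else 3)
    features.items
  else
    (PySem.Dict.ofList
      [("age", 45), ("bmi", 25), ("glucose_level", 100), ("blood_pressure", 120),
       ("insulin_level", 15), ("family_history", 0), ("physical_activity", 3),
       ("diet_score", 3), ("stress_level", 3)]).items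

-- ===== PORT B =====
-- the ordered rules table: (feature name, tiers of (keywords, value), default value)
def pvRules : List (String × List (List String × Int) × Int) :=
  [("age", [(["elderly", "senior"], 70), (["young", "teenager"], 25)], 45),
   ("bmi", [(["overweight", "obese"], 30), (["underweight", "thin"], 20)], 25),
   ("glucose_level", [(["thirsty", "urination", "fatigue", "blurred vision"], 150)], 100),
   ("blood_pressure", [(["high blood pressure", "hypertension"], 140)], 120),
   ("insulin_level", [], 15),
   ("family_history", [(["family history"], 1)], 0),
   ("physical_activity", [(["sedentary"], 2)], 3),
   ("diet_score", [(["poor diet"], 2)], 3),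
   ("stress_level", [(["stressed"], 4)], 3)]

-- the inner for-loop with break: first tier any of whose keywords occurs in low, else the default
def pvPick (low : String) : List (List String × Int) → Int → Int
  | [], d => d
  | (kws, v) :: rest, d =>
      if kws.any (fun k => PySem.Str.isIn k low) then v else pvPick low rest d

def extract_features_from_inputs_alt (file_data : Option String) (images_data : Option String) (video_data : Option String) (symptoms_text : String) : List (String × Int) :=
  let low := PySem.Str.lower symptoms_text
  (pvRules.foldl (fun d r => d.insert r.1 (pvPick low r.2.1 r.2.2))
      (PySem.Dict.empty : PySem.Dict String Int)).items

-- ===== PRECONDITION & SPEC =====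
def Spec_extract_features_from_inputs (file_data : Option String) (images_data : Option String) (video_data : Option String) (symptoms_text : String) (out : List (String × Int)) : Prop := out = extract_features_from_inputs_alt file_data images_data video_data symptoms_text
instance (file_data : Option String) (images_data : Option String) (video_data : Option String) (symptoms_text : String) (out : List (String × Int)) : Decidable (Spec_extract_features_from_inputs file_data images_data video_data symptoms_text out) := by unfold Spec_extract_features_from_inputs; infer_instance

-- ===== CLAIM (what is proved, stated in full; the proofs are below) =====
def Claim_equal_extract_features_from_inputs : Prop := ∀ (file_data : Option String) (images_data : Option String) (video_data : Option String) (symptoms_text : String), Dom_extract_features_from_inputs file_data images_data video_data symptoms_text → Spec_extract_features_from_inputs file_data images_data video_data symptoms_text (extract_features_from_inputs file_data images_data video_data symptoms_text)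

-- ===== LEMMAS AND PROOFS =====

-- ===== VERDICT (by name: the statement is the Claim_ definition above) =====
theorem extract_features_from_inputs_spec : Claim_equal_extract_features_from_inputs := by
  intro file_data images_data video_data symptoms_text _
  unfold Spec_extract_features_from_inputs extract_features_from_inputs extract_features_from_inputs_alt
  by_cases h : symptoms_text = ""
  · subst h; decide
  · simp only [ne_eq, h, not_false_eq_true, if_true, pvRules, pvPick,
      List.foldl_cons, List.foldl_nil, List.any_cons, List.any_nil, Bool.or_false]
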